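-- pv_equiv track=rewrite | github.com/MervinPraison/PraisonAI-Tools | praisonai_tools/docs_generator/rust_parser.py | _extract_doc_comments
-- ===== SOURCE A (Python) =====
-- def _extract_doc_comments(content: str, start_pos: int) -> str:
--     """Extract doc comments (///) before an item.
--
--     Args:
--         content: Full file content
--         start_pos: Position where the item definition starts
--
--     Returns:
--         Extracted documentation string
--     """
--     # Find the start of line containing start_pos
--     line_start = content.rfind("\n", 0, start_pos) + 1
--
--     # Work backwards to find doc comments
--     lines = []
--     pos = line_start - 1
--
--     while pos > 0:
--         # Find previous line
--         prev_line_end = pos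
--         prev_line_start = content.rfind("\n", 0, prev_line_end) + 1
--         line = content[prev_line_start:prev_line_end].strip()
--
--         if line.startswith("///"):
--             lines.insert(0, line[3:].strip())
--             pos = prev_line_start - 1
--         elif line.startswith("#["):
--             # Skip attributes
--             pos = prev_line_start - 1
--         elif not line:
--             # Skip empty lines
--             pos = prev_line_start - 1
--         else:
--             break
--
--     return "\n".join(lines)
-- ===== SOURCE B (Python) =====
-- def _extract_doc_comments(content: str, start_pos: int) -> str:
--     """Extract doc comments (///) before an item (idiomatic rewrite:
--     materialize the preceding lines once and scan the list backward)."""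
--     line_start = content.rfind("\n", 0, start_pos) + 1
--     collected = []
--     for line in reversed(content[:line_start].split("\n")[:-1]):
--         s = line.strip()
--         if s.startswith("///"):
--             collected.append(s[3:].strip())
--         elif s.startswith("#[") or not s:
--             continue
--         else:
--             break
--     return "\n".join(reversed(collected))
-- ===== Notes on version B (the rewrite author's own statement) =====
-- stated objective: idiomatic
-- what changed: A walks backward through raw byte positions, calling content.rfind('\n') once per line and inserting at the front of a list; B materializes the preceding lines once with one slice + split('\n'), scans that list from the end with append-and-final-reverse accumulation.
import Mathlib
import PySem

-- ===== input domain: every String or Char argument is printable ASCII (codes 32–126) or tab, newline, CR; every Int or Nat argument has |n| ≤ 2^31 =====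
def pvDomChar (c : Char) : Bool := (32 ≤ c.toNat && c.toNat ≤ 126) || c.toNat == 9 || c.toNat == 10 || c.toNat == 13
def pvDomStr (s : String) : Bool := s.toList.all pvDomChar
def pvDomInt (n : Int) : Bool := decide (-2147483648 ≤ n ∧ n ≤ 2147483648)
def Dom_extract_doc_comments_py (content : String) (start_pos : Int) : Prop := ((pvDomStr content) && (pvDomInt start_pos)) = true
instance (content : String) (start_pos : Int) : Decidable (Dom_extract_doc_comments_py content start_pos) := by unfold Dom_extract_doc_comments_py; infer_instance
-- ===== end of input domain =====

-- B replaces A's manual backward byte-position walk (one rfind per line, insert(0,·))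
-- by slicing off the preceding text once, split('\n'), and scanning that line list
-- from the end (idiomatic; same cost; return values proved equal on all inputs).

-- ===== PORT A =====

-- termination helper for A's while loop (cited in decreasing_by):
-- the rfind result that becomes the next pos is < the current pos.
theorem pvRfindGoNlCases (u : List Char) (j : Nat) :
    PySem.Chars.rfind.go u ['\n'] j = -1 ∨
      ∃ q : Nat, PySem.Chars.rfind.go u ['\n'] j = (q : Int) ∧ q < u.length ∧ u[q]? = some '\n' := by
  induction j with
  | zero =>
    rw [PySem.Chars.rfind.go]
    split
    · next h =>
      right
      rcases List.isPrefixOf_iff_prefix.mp h with ⟨t, ht⟩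
      refine ⟨0, rfl, ?_, ?_⟩ <;> rw [← ht] <;> simp
    · left; rfl
  | succ j ih =>
    rw [PySem.Chars.rfind.go]
    split
    · next h =>
      right
      have hpre : ['\n'] <+: u.drop (j + 1) := List.isPrefixOf_iff_prefix.mp h
      rcases hpre with ⟨t, ht⟩
      have hne : u.drop (j + 1) ≠ [] := by rw [← ht]; simp
      have hlen : j + 1 < u.length := by
        by_contra hc
        exact hne (List.drop_eq_nil_of_le (by omega))
      refine ⟨j + 1, rfl, hlen, ?_⟩
      have hget : (u.drop (j + 1))[0]? = u[j + 1 + 0]? := List.getElem?_drop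
      rw [← ht] at hget
      simpa using hget.symm
    · exact ih

theorem pvRfindNlCases (u : List Char) :
    PySem.Chars.rfind u ['\n'] = -1 ∨
      ∃ q : Nat, PySem.Chars.rfind u ['\n'] = (q : Int) ∧ q < u.length ∧ u[q]? = some '\n' := by
  simpa [PySem.Chars.rfind] using pvRfindGoNlCases u u.length

-- rfindFrom with start 0 is rfind on the clamped prefix
theorem pvRfindFrom0_eq (cs : List Char) (sp : Int) :
    PySem.Chars.rfindFrom cs ['\n'] 0 (some sp) =
      PySem.Chars.rfind (List.take (if (cs.length : Int) < sp then (cs.length : Int)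
        else if sp < 0 then (if sp + (cs.length : Int) < 0 then 0 else sp + (cs.length : Int))
        else sp).toNat cs) ['\n'] := by
  simp only [PySem.Chars.rfindFrom]
  rw [if_neg (by norm_num : ¬ ((0:Int) < 0))]
  have he0 : 0 ≤ (if (cs.length : Int) < sp then (cs.length : Int)
      else if sp < 0 then (if sp + (cs.length : Int) < 0 then 0 else sp + (cs.length : Int))
      else sp) := by split_ifs <;> omega
  rw [if_neg (not_lt.mpr he0)]
  simp only [Int.toNat_zero, List.drop_zero]
  split_ifs <;> omega

theorem pvClampLe (cs : List Char) (pos : Int) (h : 0 < pos) :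
    (if (cs.length : Int) < pos then (cs.length : Int)
      else if pos < 0 then (if pos + (cs.length : Int) < 0 then 0 else pos + (cs.length : Int))
      else pos).toNat ≤ pos.toNat := by
  split_ifs <;> omega

theorem pvRfindFromNlLt (cs : List Char) (pos : Int) (h : 0 < pos) :
    PySem.Chars.rfindFrom cs ['\n'] 0 (some pos) < pos := by
  rw [pvRfindFrom0_eq]
  rcases pvRfindNlCases (List.take (if (cs.length : Int) < pos then (cs.length : Int)
      else if pos < 0 then (if pos + (cs.length : Int) < 0 then 0 else pos + (cs.length : Int))
      else pos).toNat cs) with hc | ⟨q, hq, hlt, _⟩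
  · omega
  · rw [hq]
    have h1 := pvClampLe cs pos h
    have h2 := List.length_take_le (if (cs.length : Int) < pos then (cs.length : Int)
      else if pos < 0 then (if pos + (cs.length : Int) < 0 then 0 else pos + (cs.length : Int))
      else pos).toNat cs
    omega

-- A's while loop: pos walks backward; the previous line is found with
-- content.rfind('\n', 0, pos).  Python's locals prev_line_end / prev_line_start /
-- line are inlined (prev_line_end = pos, prev_line_start = rfind + 1).
def pvALoop (cs : List Char) (pos : Int) (lines : List (List Char)) : List (List Char) :=
  if h : 0 < pos then
    if PySem.Chars.startswith (PySem.Chars.strip (PySem.Chars.slice cs (some (PySem.Chars.rfindFrom cs ['\n'] 0 (some pos) + 1)) (some pos))) ['/', '/', '/'] then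
      pvALoop cs (PySem.Chars.rfindFrom cs ['\n'] 0 (some pos) + 1 - 1)
        (PySem.Chars.strip (PySem.Chars.slice (PySem.Chars.strip (PySem.Chars.slice cs (some (PySem.Chars.rfindFrom cs ['\n'] 0 (some pos) + 1)) (some pos))) (some 3) none) :: lines)
    else if PySem.Chars.startswith (PySem.Chars.strip (PySem.Chars.slice cs (some (PySem.Chars.rfindFrom cs ['\n'] 0 (some pos) + 1)) (some pos))) ['#', '['] then
      pvALoop cs (PySem.Chars.rfindFrom cs ['\n'] 0 (some pos) + 1 - 1) lines
    else if (PySem.Chars.strip (PySem.Chars.slice cs (some (PySem.Chars.rfindFrom cs ['\n'] 0 (some pos) + 1)) (some pos))).isEmpty then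
      pvALoop cs (PySem.Chars.rfindFrom cs ['\n'] 0 (some pos) + 1 - 1) lines
    else
      lines
  else
    lines
termination_by pos.toNat
decreasing_by
  all_goals
    have hlt := pvRfindFromNlLt cs pos h
    omega

def extract_doc_comments_py (content : String) (start_pos : Int) : String :=
  let cs := content.toList
  let line_start := PySem.Chars.rfindFrom cs ['\n'] 0 (some start_pos) + 1
  String.ofList (PySem.Chars.join ['\n'] (pvALoop cs (line_start - 1) []))

-- ===== PORT B =====

-- B's for loop over reversed(lines) with break, appending into `collected`
def pvBLoop (ls : List (List Char)) (collected : List (List Char)) : List (List Char) :=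
  match ls with
  | [] => collected
  | line :: rest =>
    -- Python's local s = line.strip() is inlined
    if PySem.Chars.startswith (PySem.Chars.strip line) ['/', '/', '/'] then
      pvBLoop rest (collected ++ [PySem.Chars.strip (PySem.Chars.slice (PySem.Chars.strip line) (some 3) none)])
    else if PySem.Chars.startswith (PySem.Chars.strip line) ['#', '['] || (PySem.Chars.strip line).isEmpty then
      pvBLoop rest collected
    else
      collected

def extract_doc_comments_py_alt (content : String) (start_pos : Int) : String :=
  let cs := content.toList
  let line_start := PySem.Chars.rfindFrom cs ['\n'] 0 (some start_pos) + 1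
  let prefixLines := PySem.List.slice (PySem.Chars.splitOn (PySem.Chars.slice cs none (some line_start)) ['\n']) none (some (-1))
  String.ofList (PySem.Chars.join ['\n'] (pvBLoop prefixLines.reverse []).reverse)

-- ===== PRECONDITION & SPEC =====
def Spec_extract_doc_comments_py (content : String) (start_pos : Int) (out : String) : Prop := out = extract_doc_comments_py_alt content start_pos
instance (content : String) (start_pos : Int) (out : String) : Decidable (Spec_extract_doc_comments_py content start_pos out) := by unfold Spec_extract_doc_comments_py; infer_instance

-- ===== CLAIM (what is proved, stated in full; the proofs are below) =====
def Claim_equal_extract_doc_comments_py : Prop := ∀ (content : String) (start_pos : Int), Dom_extract_doc_comments_py content start_pos → Spec_extract_doc_comments_py content start_pos (extract_doc_comments_py content start_pos)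

-- ===== LEMMAS AND PROOFS =====

-- proof-side model of str.split('\n')
def pvSplitNl : List Char → List (List Char)
  | [] => [[]]
  | c :: rest => if c = '\n' then [] :: pvSplitNl rest else (c :: (pvSplitNl rest).headI) :: (pvSplitNl rest).tail

theorem pvSplitNl_ne_nil (l : List Char) : pvSplitNl l ≠ [] := by
  cases l with
  | nil => simp [pvSplitNl]
  | cons c rest => simp only [pvSplitNl]; split <;> simp

theorem pvSplitNl_append_nl (w m : List Char) :
    pvSplitNl (w ++ '\n' :: m) = pvSplitNl w ++ pvSplitNl m := by
  induction w with
  | nil => simp [pvSplitNl]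
  | cons c w ih =>
    by_cases hc : c = '\n'
    · subst hc; simp [pvSplitNl, ih]
    · rcases hl : pvSplitNl w with _ | ⟨h, t⟩
      · exact absurd hl (pvSplitNl_ne_nil w)
      · simp [pvSplitNl, hc, ih, hl]

theorem pvSplitNl_no_nl (m : List Char) (h : '\n' ∉ m) : pvSplitNl m = [m] := by
  induction m with
  | nil => rfl
  | cons c rest ih =>
    simp only [List.mem_cons, not_or] at h
    have hc : ¬ c = '\n' := fun he => h.1 he.symm
    simp [pvSplitNl, hc, ih h.2]

theorem pvSplitOn_go_spec : ∀ (fuel : Nat) (l cur : List Char) (acc : List (List Char)),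
    l.length < fuel →
    PySem.Chars.splitOn.go ['\n'] fuel l cur acc =
      acc.reverse ++ (cur.reverse ++ (pvSplitNl l).headI) :: (pvSplitNl l).tail := by
  intro fuel
  induction fuel with
  | zero => intro l cur acc h; omega
  | succ fuel ih =>
    intro l cur acc h
    cases l with
    | nil =>
      rw [PySem.Chars.splitOn.go]
      simp [pvSplitNl]
      omega
    | cons c rest =>
      rw [PySem.Chars.splitOn.go]
      by_cases hc : c = '\n'
      · subst hc
        rw [if_pos (by simp [List.isPrefixOf])]
        have hdrop : List.drop ['\n'].length ('\n' :: rest) = rest := rfl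
        rw [hdrop, ih rest [] (cur.reverse :: acc) (by simp at h ⊢; omega)]
        rcases hl : pvSplitNl rest with _ | ⟨hd, tl⟩
        · exact absurd hl (pvSplitNl_ne_nil rest)
        · simp [pvSplitNl, hl]
      · rw [if_neg (by simp [List.isPrefixOf]; exact fun he => hc he.symm)]
        rw [ih rest (c :: cur) acc (by simp at h ⊢; omega)]
        rcases hl : pvSplitNl rest with _ | ⟨hd, tl⟩
        · exact absurd hl (pvSplitNl_ne_nil rest)
        · simp [pvSplitNl, hc, hl]

theorem pvSplitOn_nl (l : List Char) : PySem.Chars.splitOn l ['\n'] = pvSplitNl l := by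
  rw [PySem.Chars.splitOn, pvSplitOn_go_spec (l.length + 1) l [] [] (by omega)]
  rcases hl : pvSplitNl l with _ | ⟨hd, tl⟩
  · exact absurd hl (pvSplitNl_ne_nil l)
  · simp

-- last-occurrence decomposition of a list around its final newline
theorem pvDecompNl (u : List Char) :
    '\n' ∉ u ∨ ∃ w m, u = w ++ '\n' :: m ∧ '\n' ∉ m := by
  induction u with
  | nil => left; simp
  | cons c rest ih =>
    rcases ih with h | ⟨w, m, hwm, hm⟩
    · by_cases hc : c = '\n'
      · subst hc; right; exact ⟨[], rest, rfl, h⟩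
      · left
        intro hmem
        rcases List.mem_cons.mp hmem with he | hr
        · exact hc he.symm
        · exact h hr
    · right; exact ⟨c :: w, m, by rw [hwm]; simp, hm⟩

theorem pvRfindGoNl_none (u : List Char) (h : '\n' ∉ u) :
    ∀ j, PySem.Chars.rfind.go u ['\n'] j = -1 := by
  intro j
  induction j with
  | zero =>
    rw [PySem.Chars.rfind.go, if_neg]
    intro hp
    rcases List.isPrefixOf_iff_prefix.mp hp with ⟨t, ht⟩
    exact h (by rw [← ht]; simp)
  | succ j ih =>
    rw [PySem.Chars.rfind.go, if_neg, ih]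
    intro hp
    rcases List.isPrefixOf_iff_prefix.mp hp with ⟨t, ht⟩
    exact h (List.mem_of_mem_drop (l := u) (i := j + 1) (by rw [← ht]; simp))

theorem pvNoNlPrefix (m : List Char) (hm : '\n' ∉ m) (k : Nat) :
    ['\n'].isPrefixOf (m.drop k) = false := by
  cases hd : m.drop k with
  | nil => simp [List.isPrefixOf]
  | cons c t =>
    have hc : c ∈ m := List.mem_of_mem_drop (by rw [hd]; simp)
    have : ¬ ('\n' = c) := fun he => hm (he ▸ hc)
    simp [List.isPrefixOf, this]

theorem pvRfindGoNl_last (w m : List Char) (hm : '\n' ∉ m) :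
    ∀ k, k ≤ m.length + 1 →
      PySem.Chars.rfind.go (w ++ '\n' :: m) ['\n'] (w.length + k) = (w.length : Int) := by
  intro k
  induction k with
  | zero =>
    intro _
    have hp : ['\n'].isPrefixOf ((w ++ '\n' :: m).drop w.length) = true := by
      simp [List.isPrefixOf]
    rw [Nat.add_zero]
    rcases hw : w.length with _ | j
    · rw [hw, List.drop_zero] at hp
      rw [PySem.Chars.rfind.go, if_pos hp]
      simp
    · rw [hw] at hp
      rw [PySem.Chars.rfind.go, if_pos hp]
  | succ k ih =>
    intro hk
    have hidx : w.length + (k + 1) = (w.length + k) + 1 := by omega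
    rw [hidx, PySem.Chars.rfind.go, if_neg, ih (by omega)]
    have hdrop : (w ++ '\n' :: m).drop (w.length + k + 1) = m.drop k := by
      rw [show w.length + k + 1 = w.length + (k + 1) by omega, List.drop_append,
        List.drop_eq_nil_of_le (by omega), Nat.add_sub_cancel_left, List.drop_succ_cons]
      simp
    rw [hdrop]
    simp [pvNoNlPrefix m hm k]

theorem pvRfindNl_none (u : List Char) (h : '\n' ∉ u) : PySem.Chars.rfind u ['\n'] = -1 := by
  simp [PySem.Chars.rfind, pvRfindGoNl_none u h]

theorem pvRfindNl_last (w m : List Char) (hm : '\n' ∉ m) :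
    PySem.Chars.rfind (w ++ '\n' :: m) ['\n'] = (w.length : Int) := by
  rw [PySem.Chars.rfind]
  have : (w ++ '\n' :: m).length = w.length + (m.length + 1) := by simp
  rw [this]
  exact pvRfindGoNl_last w m hm (m.length + 1) (by omega)

-- rfindFrom on a Nat end-bound within range is rfind on the prefix
theorem pvRfindFrom_take (cs : List Char) (k : Nat) (hk : k ≤ cs.length) :
    PySem.Chars.rfindFrom cs ['\n'] 0 (some (k : Int)) = PySem.Chars.rfind (cs.take k) ['\n'] := by
  rw [pvRfindFrom0_eq]
  have h1 : ¬ ((cs.length : Int) < (k : Int)) := by omega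
  have h2 : ¬ ((k : Int) < 0) := by omega
  rw [if_neg h1, if_neg h2, Int.toNat_natCast]

-- invariant delivered by any rfind('\n', 0, ·): -1 or the index of a newline in cs
theorem pvRfindFromNlSpec (cs : List Char) (sp : Int) :
    PySem.Chars.rfindFrom cs ['\n'] 0 (some sp) = -1 ∨
      ∃ q : Nat, PySem.Chars.rfindFrom cs ['\n'] 0 (some sp) = (q : Int) ∧ q < cs.length ∧
        cs[q]? = some '\n' := by
  rw [pvRfindFrom0_eq]
  set t := (if (cs.length : Int) < sp then (cs.length : Int)
      else if sp < 0 then (if sp + (cs.length : Int) < 0 then 0 else sp + (cs.length : Int))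
      else sp).toNat with ht
  rcases pvRfindNlCases (cs.take t) with hc | ⟨q, hq, hlt, hget⟩
  · left; exact hc
  · right
    refine ⟨q, hq, ?_, ?_⟩
    · have := List.length_take_le t cs; omega
    · rw [List.getElem?_take] at hget
      have hl2 : (List.take t cs).length ≤ t := List.length_take_le t cs
      rwa [if_pos (by omega)] at hget

-- the two loops agree: A at a newline position k computes B's scan of the lines before k
theorem pvMain (cs : List Char) : ∀ (k : Nat), cs[k]? = some '\n' → ∀ coll : List (List Char),
    pvALoop cs (k : Int) coll.reverse =
      (pvBLoop ((pvSplitNl (cs.take (k + 1))).dropLast).reverse coll).reverse := by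
  intro k
  induction k using Nat.strong_induction_on with
  | _ k ih =>
    intro hk coll
    have hklen : k < cs.length := by
      by_contra hc
      rw [List.getElem?_eq_none (by omega)] at hk
      exact absurd hk (by simp)
    have htake : cs.take (k + 1) = cs.take k ++ ['\n'] := by
      rw [List.take_add_one, hk]
      rfl
    rcases Nat.eq_zero_or_pos k with hk0 | hkpos
    · subst hk0
      rw [pvALoop, dif_neg (by omega)]
      rw [htake, show cs.take 0 = ([] : List Char) from rfl]
      simp [pvSplitNl, pvBLoop, PySem.Chars.strip, PySem.Chars.lstrip, PySem.Chars.rstrip,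
        PySem.Chars.startswith]
    · have hkle : k ≤ cs.length := by omega
      have hkposI : (0 : Int) < (k : Int) := by omega
      rw [pvALoop, dif_pos hkposI, pvRfindFrom_take cs k hkle]
      rcases pvDecompNl (cs.take k) with hno | ⟨w, m, hwm, hm⟩
      · -- no newline before this line: it is the first line of the file
        rw [pvRfindNl_none _ hno]
        have hstop : ∀ acc : List (List Char), pvALoop cs (-1 + 1 - 1) acc = acc := fun acc => by
          rw [pvALoop, dif_neg (by omega)]
        simp only [hstop]
        have hsl : PySem.Chars.slice cs (some (-1 + 1)) (some (k : Int)) = cs.take k := by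
          rw [show (-1 + 1 : Int) = 0 from by norm_num, PySem.Chars.slice_eq_listSlice,
            PySem.List.slice_zero_start, PySem.List.slice_to _ (by omega : (0 : Int) ≤ (k : Int))]
          simp
        rw [hsl, htake, pvSplitNl_append_nl, pvSplitNl_no_nl _ hno,
          show pvSplitNl ([] : List Char) = [[]] from rfl, List.dropLast_concat]
        simp only [List.reverse_cons, List.reverse_nil, List.nil_append, pvBLoop]
        by_cases h1 : PySem.Chars.startswith (PySem.Chars.strip (cs.take k)) ['/', '/', '/'] = true
        · simp [h1]
        · by_cases h2 : PySem.Chars.startswith (PySem.Chars.strip (cs.take k)) ['#', '['] = true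
          · simp [h1, h2]
          · by_cases h3 : (PySem.Chars.strip (cs.take k)).isEmpty = true
            · simp [h1, h2, h3]
            · simp [h1, h2, h3]
      · -- there is a previous newline at index w.length
        rw [hwm, pvRfindNl_last w m hm]
        have hlen : k = w.length + m.length + 1 := by
          have h1 := congrArg List.length hwm
          simp [min_eq_left hkle] at h1
          omega
        have hq' : cs[w.length]? = some '\n' := by
          have h1 : (cs.take k)[w.length]? = some '\n' := by
            rw [hwm, List.getElem?_append_right (le_refl _)]
            simp
          rw [List.getElem?_take, if_pos (by omega)] at h1
          exact h1
        have hslice : PySem.Chars.slice cs (some ((w.length : Int) + 1)) (some (k : Int)) = m := by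
          rw [show ((w.length : Int) + 1) = ((w.length + 1 : Nat) : Int) from by push_cast; ring,
            PySem.Chars.slice_eq_listSlice,
            PySem.List.slice_toNat _ (by omega) (by omega), Int.toNat_natCast, Int.toNat_natCast,
            ← List.drop_take, hwm, List.drop_append, List.drop_eq_nil_of_le (by omega)]
          simp
        have htq : cs.take (w.length + 1) = w ++ ['\n'] := by
          rw [show cs.take (w.length + 1) = (cs.take k).take (w.length + 1) from by
              rw [List.take_take, min_eq_left (by omega)],
            hwm, List.take_append, List.take_of_length_le (by omega)]
          simp
        have hprev : (pvSplitNl (cs.take (w.length + 1))).dropLast = pvSplitNl w := by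
          rw [htq, pvSplitNl_append_nl w [], show pvSplitNl ([] : List Char) = [[]] from rfl,
            List.dropLast_concat]
        have hIH : ∀ coll' : List (List Char), pvALoop cs ((w.length : Int) + 1 - 1) coll'.reverse =
            (pvBLoop ((pvSplitNl w).reverse) coll').reverse := by
          intro coll'
          have h0 := ih w.length (by omega) hq' coll'
          rw [hprev] at h0
          rw [show ((w.length : Int) + 1 - 1) = (w.length : Int) from by ring]
          exact h0
        rw [hslice, htake, hwm, List.append_assoc, List.cons_append,
          pvSplitNl_append_nl w, pvSplitNl_append_nl m [],
          pvSplitNl_no_nl m hm, show pvSplitNl ([] : List Char) = [[]] from rfl,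
          show ([m] ++ [[]] : List (List Char)) = [m] ++ [[]] from rfl,
          ← List.append_assoc, List.dropLast_concat]
        simp only [List.reverse_append, List.reverse_cons, List.reverse_nil, List.nil_append,
          List.cons_append, pvBLoop]
        by_cases h1 : PySem.Chars.startswith (PySem.Chars.strip m) ['/', '/', '/'] = true
        · rw [if_pos h1, if_pos h1]
          rw [show (PySem.Chars.strip (PySem.Chars.slice (PySem.Chars.strip m) (some 3) none) :: coll.reverse : List (List Char)) =
              (coll ++ [PySem.Chars.strip (PySem.Chars.slice (PySem.Chars.strip m) (some 3) none)]).reverse from by simp]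
          exact hIH _
        · by_cases h2 : PySem.Chars.startswith (PySem.Chars.strip m) ['#', '['] = true
          · rw [if_neg h1, if_neg h1, if_pos h2, if_pos (by simp [h2])]
            exact hIH coll
          · by_cases h3 : (PySem.Chars.strip m).isEmpty = true
            · rw [if_neg h1, if_neg h1, if_neg h2, if_pos h3, if_pos (by simp [h2, h3])]
              exact hIH coll
            · rw [if_neg h1, if_neg h1, if_neg h2, if_neg h3, if_neg (by simp [h2, h3])]

-- ===== VERDICT (by name: the statement is the Claim_ definition above) =====
theorem extract_doc_comments_py_spec : Claim_equal_extract_doc_comments_py := by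
  unfold Claim_equal_extract_doc_comments_py Spec_extract_doc_comments_py
  intro content start_pos _
  simp only [extract_doc_comments_py, extract_doc_comments_py_alt]
  rcases pvRfindFromNlSpec content.toList start_pos with h | ⟨q, hq, hlt, hnl⟩
  · rw [h]
    rw [show (-1 + 1 - 1 : Int) = -1 from by norm_num, pvALoop, dif_neg (by omega)]
    rw [show (-1 + 1 : Int) = 0 from by norm_num, PySem.Chars.slice_eq_listSlice,
      PySem.List.slice_to _ (by omega : (0 : Int) ≤ 0)]
    simp [pvSplitOn_nl, pvSplitNl, pvBLoop, PySem.List.slice_to_neg_one]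
  · rw [hq]
    rw [show ((q : Int) + 1 - 1) = (q : Int) from by ring]
    rw [PySem.Chars.slice_eq_listSlice, PySem.List.slice_to_neg_one,
      show ((q : Int) + 1) = ((q + 1 : Nat) : Int) from by push_cast; ring,
      PySem.List.slice_to _ (by omega : (0 : Int) ≤ ((q + 1 : Nat) : Int)), Int.toNat_natCast,
      pvSplitOn_nl]
    have h0 := pvMain content.toList q hnl []
    simp only [List.reverse_nil] at h0
    rw [h0]
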